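-- pv_equiv track=rewrite | github.com/DevilDeath07/Leet_code_solution | daily_solution/Easy/3477. Fruits Into Baskets II.py | numOfUnplacedFruits
-- ===== SOURCE A (Python) =====
-- from typing import List
--
-- def numOfUnplacedFruits(fruits: List[int], baskets: List[int]) -> int:
--     used = [False] * len(baskets)  # Track basket usage
--     perfect = 0
--
--     for i in range(len(fruits)):
--         for j in range(len(baskets)):
--             if not used[j] and fruits[i] <= baskets[j]:
--                 used[j] = True
--                 perfect += 1
--                 break
--             else:
--                 continue
--
--     result = len(fruits) - perfect
--     return result
-- ===== SOURCE B (Python) =====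
-- from typing import List
--
-- # Segment tree over basket capacities: each node caches the max available
-- # capacity in its range (None = all used).  Placing a fruit descends to the
-- # leftmost leaf with capacity >= fruit and marks it used.
--
-- def _top(t):
--     return t[1]
--
-- def _mx(a, b):
--     if a is None:
--         return b
--     if b is None:
--         return a
--     return a if a >= b else b
--
-- def _fits(f, v):
--     return v is not None and f <= v
--
-- def _build(bs):
--     # node: ('leaf', capacity-or-None) | ('node', cached max, left, right)
--     if len(bs) == 1:
--         return ('leaf', bs[0])
--     mid = len(bs) // 2
--     l = _build(bs[:mid])
--     r = _build(bs[mid:])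
--     return ('node', _mx(_top(l), _top(r)), l, r)
--
-- def _place(t, f):
--     # leftmost available basket with capacity >= f; returns (new tree, placed?)
--     if t[0] == 'leaf':
--         if _fits(f, t[1]):
--             return (('leaf', None), True)
--         return (t, False)
--     _, _, l, r = t
--     if _fits(f, _top(l)):
--         l2, ok = _place(l, f)
--         return (('node', _mx(_top(l2), _top(r)), l2, r), ok)
--     if _fits(f, _top(r)):
--         r2, ok = _place(r, f)
--         return (('node', _mx(_top(l), _top(r2)), l, r2), ok)
--     return (t, False)
--
-- def numOfUnplacedFruits(fruits: List[int], baskets: List[int]) -> int: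
--     if not baskets:
--         return len(fruits)
--     t = _build(baskets)
--     unplaced = 0
--     for f in fruits:
--         t, ok = _place(t, f)
--         if not ok:
--             unplaced += 1
--     return unplaced
-- ===== Notes on version B (the rewrite author's own statement) =====
-- stated objective: faster
-- what changed: B replaces A's per-fruit linear scan over a used-flag array by a persistent max segment tree over basket capacities, descending to the leftmost available basket with capacity >= fruit in O(log m) per fruit.
import Mathlib
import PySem

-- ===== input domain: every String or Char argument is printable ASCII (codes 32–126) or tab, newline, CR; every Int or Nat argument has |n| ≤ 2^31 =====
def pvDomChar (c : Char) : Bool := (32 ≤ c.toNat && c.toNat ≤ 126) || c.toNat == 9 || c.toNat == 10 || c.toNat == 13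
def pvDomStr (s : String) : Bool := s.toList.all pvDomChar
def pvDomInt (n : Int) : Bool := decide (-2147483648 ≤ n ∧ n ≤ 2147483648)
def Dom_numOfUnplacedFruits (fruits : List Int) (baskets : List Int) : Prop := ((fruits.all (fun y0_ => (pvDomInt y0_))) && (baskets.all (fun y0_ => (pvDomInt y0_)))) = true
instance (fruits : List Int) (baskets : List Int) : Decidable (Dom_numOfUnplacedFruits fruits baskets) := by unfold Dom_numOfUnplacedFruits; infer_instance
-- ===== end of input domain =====

-- B replaces A's per-fruit linear scan over a used-flag array by a max segment
-- tree over basket capacities (leftmost-fitting descent), asymptotically faster.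

-- ===== PORT A =====
-- inner `for j in range(len(baskets))`: walk baskets together with the used
-- flags; on the first j with `not used[j] and f <= baskets[j]` set the flag
-- and report the break; otherwise continue.
def aScan (f : Int) : List Int → List Bool → List Bool × Bool
  | [], u => (u, false)
  | _ :: _, [] => ([], false)   -- unreachable: used has length len(baskets)
  | b :: bs, uj :: us =>
    if !uj && decide (f ≤ b) then (true :: us, true)
    else
      let r := aScan f bs us
      (uj :: r.1, r.2)

def numOfUnplacedFruits (fruits : List Int) (baskets : List Int) : Int :=
  let used := List.replicate baskets.length false
  let st := fruits.foldl (fun (st : List Bool × Int) f =>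
      let r := aScan f baskets st.1
      (r.1, st.2 + if r.2 then 1 else 0)) (used, 0)
  (fruits.length : Int) - st.2

-- ===== PORT B =====
-- segment tree node: ('leaf', capacity-or-None) | ('node', cached max, l, r)
inductive STree : Type
  | leaf : Option Int → STree
  | node : Option Int → STree → STree → STree
deriving DecidableEq, Repr

-- Python _top
def sTop : STree → Option Int
  | .leaf v => v
  | .node m _ _ => m

-- Python _mx: max ignoring None
def mxOpt : Option Int → Option Int → Option Int
  | none, b => b
  | some a, none => some a
  | some a, some b => some (if b ≤ a then a else b)

-- Python _fits
def fits (f : Int) : Option Int → Bool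
  | none => false
  | some v => decide (f ≤ v)

-- Python _build (called on non-empty lists only; [] case is unreachable)
def build : List Int → STree
  | [] => .leaf none
  | [b] => .leaf (some b)
  | b1 :: b2 :: rest =>
    let bs := b1 :: b2 :: rest
    let mid := bs.length / 2
    let l := build (bs.take mid)
    let r := build (bs.drop mid)
    .node (mxOpt (sTop l) (sTop r)) l r
termination_by bs => bs.length
decreasing_by
  · simp; omega
  · simp; omega

-- Python _place
def place (t : STree) (f : Int) : STree × Bool :=
  match t with
  | .leaf v => if fits f v then (.leaf none, true) else (t, false)
  | .node _ l r =>
    if fits f (sTop l) then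
      let p := place l f
      (.node (mxOpt (sTop p.1) (sTop r)) p.1 r, p.2)
    else if fits f (sTop r) then
      let p := place r f
      (.node (mxOpt (sTop l) (sTop p.1)) l p.1, p.2)
    else (t, false)

def numOfUnplacedFruits_alt (fruits : List Int) (baskets : List Int) : Int :=
  match baskets with
  | [] => (fruits.length : Int)
  | _ :: _ =>
    (fruits.foldl (fun (st : STree × Int) f =>
        let p := place st.1 f
        (p.1, st.2 + if p.2 then 0 else 1)) (build baskets, 0)).2

-- ===== PRECONDITION & SPEC =====
def Spec_numOfUnplacedFruits (fruits : List Int) (baskets : List Int) (out : Int) : Prop := out = numOfUnplacedFruits_alt fruits baskets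
instance (fruits : List Int) (baskets : List Int) (out : Int) : Decidable (Spec_numOfUnplacedFruits fruits baskets out) := by unfold Spec_numOfUnplacedFruits; infer_instance

-- ===== CLAIM (what is proved, stated in full; the proofs are below) =====
def Claim_equal_numOfUnplacedFruits : Prop := ∀ (fruits : List Int) (baskets : List Int), Dom_numOfUnplacedFruits fruits baskets → Spec_numOfUnplacedFruits fruits baskets (numOfUnplacedFruits fruits baskets)

-- ===== LEMMAS AND PROOFS =====

-- abstraction: the availability list (None = used basket)
def optList : List Int → List Bool → List (Option Int)
  | [], _ => []
  | _ :: _, [] => []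
  | b :: bs, u :: us => (if u then none else some b) :: optList bs us

-- reference step: mark the first fitting entry as used
def markFirst (f : Int) : List (Option Int) → List (Option Int) × Bool
  | [] => ([], false)
  | o :: os =>
    if fits f o then (none :: os, true)
    else
      let r := markFirst f os
      (o :: r.1, r.2)

def leaves : STree → List (Option Int)
  | .leaf v => [v]
  | .node _ l r => leaves l ++ leaves r

def TreeInv : STree → Prop
  | .leaf _ => True
  | .node m l r => m = mxOpt (sTop l) (sTop r) ∧ TreeInv l ∧ TreeInv r

theorem fits_mxOpt (f : Int) (a b : Option Int) :
    fits f (mxOpt a b) = (fits f a || fits f b) := by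
  cases a <;> cases b <;> simp [mxOpt, fits]
  rename_i x y
  by_cases h : y ≤ x <;> simp [h] <;> omega

theorem markFirst_any (f : Int) (l : List (Option Int)) :
    (markFirst f l).2 = l.any (fits f) := by
  induction l with
  | nil => simp [markFirst]
  | cons o os ih =>
    by_cases h : fits f o <;> simp [markFirst, h, ih]

theorem markFirst_no (f : Int) (l : List (Option Int)) (h : l.any (fits f) = false) :
    markFirst f l = (l, false) := by
  induction l with
  | nil => simp [markFirst]
  | cons o os ih =>
    simp only [List.any_cons, Bool.or_eq_false_iff] at h
    simp [markFirst, h.1, ih h.2]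

theorem markFirst_append (f : Int) (xs ys : List (Option Int)) :
    markFirst f (xs ++ ys) =
      (if xs.any (fits f) then ((markFirst f xs).1 ++ ys, true)
       else (xs ++ (markFirst f ys).1, (markFirst f ys).2)) := by
  induction xs with
  | nil => simp [markFirst]
  | cons o os ih =>
    by_cases h : fits f o
    · simp [markFirst, h]
    · simp only [List.cons_append, markFirst, h, Bool.false_eq_true, if_false, ih,
        List.any_cons, Bool.false_or]
      by_cases h2 : os.any (fits f) <;> simp [h2]

-- under TreeInv, the cached top detects whether some leaf fits
theorem fits_top (f : Int) (t : STree) (h : TreeInv t) :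
    fits f (sTop t) = (leaves t).any (fits f) := by
  induction t with
  | leaf v => simp [sTop, leaves]
  | node m l r ihl ihr =>
    obtain ⟨hm, hl, hr⟩ := h
    show fits f m = (leaves (.node m l r)).any (fits f)
    rw [hm, fits_mxOpt, ihl hl, ihr hr]
    simp [leaves]

-- place realises markFirst on the leaves and preserves the invariant
theorem place_spec (f : Int) (t : STree) (h : TreeInv t) :
    leaves (place t f).1 = (markFirst f (leaves t)).1 ∧
    (place t f).2 = (markFirst f (leaves t)).2 ∧
    TreeInv (place t f).1 := by
  induction t with
  | leaf v =>
    by_cases hf : fits f v <;> simp [place, leaves, markFirst, hf, TreeInv]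
  | node m l r ihl ihr =>
    obtain ⟨hm, hl, hr⟩ := h
    have ftl := fits_top f l hl
    have ftr := fits_top f r hr
    by_cases h1 : fits f (sTop l)
    · obtain ⟨e1, e2, e3⟩ := ihl hl
      have hany : (leaves l).any (fits f) = true := by rw [← ftl]; exact h1
      simp [place, h1, leaves, markFirst_append, hany, e1, TreeInv, e3, hr,
        markFirst_any, e2]
    · have hnol : (leaves l).any (fits f) = false := by
        rw [← ftl]; simpa using h1
      by_cases h2 : fits f (sTop r)
      · obtain ⟨e1, e2, e3⟩ := ihr hr
        simp [place, h1, h2, leaves, markFirst_append, hnol, e1, e2, TreeInv, e3, hl]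
      · have hnor : (leaves r).any (fits f) = false := by
          rw [← ftr]; simpa using h2
        simp [place, h1, h2, leaves, markFirst_append, hnol,
          markFirst_no f _ hnor, TreeInv, hm, hl, hr]

theorem build_spec (bs : List Int) (hne : bs ≠ []) :
    leaves (build bs) = bs.map some ∧ TreeInv (build bs) := by
  induction bs using build.induct with
  | case1 => simp at hne
  | case2 b => simp [build, leaves, TreeInv]
  | case3 b1 b2 rest bs mid ih1 ih2 =>
    have hl := ih1 (by simp [bs, mid])
    have hr := ih2 (by simp [bs, mid]; omega)
    simp only [bs, mid] at hl hr
    simp only [build]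
    constructor
    · simp only [leaves]
      rw [hl.1, hr.1, ← List.map_append, List.take_append_drop]
    · exact ⟨rfl, hl.2, hr.2⟩

theorem aScan_length (f : Int) (bs : List Int) (u : List Bool) :
    (aScan f bs u).1.length = u.length := by
  induction bs generalizing u with
  | nil => simp [aScan]
  | cons b bs ih =>
    cases u with
    | nil => simp [aScan]
    | cons uj us =>
      by_cases h : (!uj && decide (f ≤ b)) = true <;> simp [aScan, h, ih]

-- A's flag scan is markFirst through the optList abstraction
theorem aScan_markFirst (f : Int) (bs : List Int) (u : List Bool)
    (h : u.length = bs.length) :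
    optList bs (aScan f bs u).1 = (markFirst f (optList bs u)).1 ∧
    (aScan f bs u).2 = (markFirst f (optList bs u)).2 := by
  induction bs generalizing u with
  | nil =>
    have : u = [] := List.eq_nil_of_length_eq_zero h
    simp [this, aScan, optList, markFirst]
  | cons b bs ih =>
    cases u with
    | nil => simp at h
    | cons uj us =>
      simp only [List.length_cons, Nat.succ_inj] at h
      cases uj with
      | true => simpa [aScan, optList, markFirst, fits] using ih us h
      | false =>
        by_cases hf : f ≤ b
        · simp [aScan, optList, markFirst, fits, hf]
        · simpa [aScan, optList, markFirst, fits, hf] using ih us h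

-- fold bridge 1: A's placed-counter fold vs the markFirst unplaced fold
theorem fold_a_mark (baskets : List Int) (fruits : List Int) :
    ∀ (u : List Bool) (p c : Int), u.length = baskets.length →
    (fruits.foldl (fun (st : List (Option Int) × Int) f =>
        let r := markFirst f st.1
        (r.1, st.2 + if r.2 then 0 else 1)) (optList baskets u, c)).2
      = c + (fruits.length : Int) -
        ((fruits.foldl (fun (st : List Bool × Int) f =>
            let r := aScan f baskets st.1
            (r.1, st.2 + if r.2 then 1 else 0)) (u, p)).2 - p) := by
  induction fruits with
  | nil => intro u p c _; simp
  | cons f fs ih =>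
    intro u p c h
    have hs := aScan_markFirst f baskets u h
    have hl : (aScan f baskets u).1.length = baskets.length := by
      rw [aScan_length]; exact h
    simp only [List.foldl_cons]
    rw [← hs.1, ← hs.2]
    cases hb : (aScan f baskets u).2 with
    | false =>
      have h5 := ih (aScan f baskets u).1 p (c + 1) hl
      simp only [Bool.false_eq_true, if_false, List.length_cons]
      rw [h5]; push_cast; ring_nf
    | true =>
      have h5 := ih (aScan f baskets u).1 (p + 1) c hl
      simp only [if_true, List.length_cons]
      rw [show c + 0 = c by ring, h5]; push_cast; ring_nf

-- fold bridge 2: the tree fold vs the markFirst fold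
theorem fold_tree_mark (fruits : List Int) :
    ∀ (t : STree) (c : Int), TreeInv t →
    (fruits.foldl (fun (st : STree × Int) f =>
        let p := place st.1 f
        (p.1, st.2 + if p.2 then 0 else 1)) (t, c)).2
      = (fruits.foldl (fun (st : List (Option Int) × Int) f =>
          let r := markFirst f st.1
          (r.1, st.2 + if r.2 then 0 else 1)) (leaves t, c)).2 := by
  induction fruits with
  | nil => intro t c _; simp
  | cons f fs ih =>
    intro t c hTreeInv
    obtain ⟨e1, e2, e3⟩ := place_spec f t hTreeInv
    simp only [List.foldl_cons]
    rw [e2]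
    have := ih (place t f).1 (c + if (markFirst f (leaves t)).2 then 0 else 1) e3
    rw [this, e1]

theorem optList_replicate (bs : List Int) :
    optList bs (List.replicate bs.length false) = bs.map some := by
  induction bs with
  | nil => rfl
  | cons b t ih => simp [optList, List.replicate, ih]

theorem afold_nil (fruits : List Int) (u : List Bool) (p : Int) :
    (fruits.foldl (fun (st : List Bool × Int) f =>
        let r := aScan f [] st.1
        (r.1, st.2 + if r.2 then 1 else 0)) (u, p)).2 = p := by
  induction fruits generalizing u with
  | nil => rfl
  | cons f fs ih => simpa [aScan] using ih u

-- ===== VERDICT (by name: the statement is the Claim_ definition above) =====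
theorem numOfUnplacedFruits_spec : Claim_equal_numOfUnplacedFruits := by
  intro fruits baskets _
  unfold Spec_numOfUnplacedFruits numOfUnplacedFruits numOfUnplacedFruits_alt
  cases baskets with
  | nil =>
    simp only [List.length_nil, List.replicate]
    rw [afold_nil]
    ring
  | cons b bs =>
    have hb := build_spec (b :: bs) (by simp)
    have h2 := fold_tree_mark fruits (build (b :: bs)) 0 hb.2
    rw [hb.1, ← optList_replicate] at h2
    have h1 := fold_a_mark (b :: bs) fruits
      (List.replicate (b :: bs).length false) 0 0 (by simp)
    simp only at h1 h2 ⊢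
    rw [h2, h1]
    ring_nf
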